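-- pv_equiv track=rewrite | github.com/Lappalainen-Joel/useful_scripts | unigrep.py | createKeywordList
-- ===== SOURCE A (Python) =====
-- def createKeywordList(argslist):
--     keywordList = []
--     for i in argslist:
--         if i == '-f':
--             return keywordList
--         elif i != '-o' and i != '-q' and i != '-r':
--             keywordList.append(i)
--     return keywordList[:-1]
-- ===== SOURCE B (Python) =====
-- def createKeywordList(argslist):
--     flags = ('-o', '-q', '-r')
--     if '-f' in argslist:
--         prefix = argslist[:argslist.index('-f')]
--         return [i for i in prefix if i not in flags]
--     filtered = [i for i in argslist if i not in flags]
--     return filtered[:-1]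
-- ===== Notes on version B (the rewrite author's own statement) =====
-- stated objective: simpler
-- what changed: Replaces the early-returning accumulator loop with a detect-then-slice decomposition: if '-f' occurs, filter the prefix before its first occurrence; otherwise filter the whole list and drop the last element with a slice.
import Mathlib
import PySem

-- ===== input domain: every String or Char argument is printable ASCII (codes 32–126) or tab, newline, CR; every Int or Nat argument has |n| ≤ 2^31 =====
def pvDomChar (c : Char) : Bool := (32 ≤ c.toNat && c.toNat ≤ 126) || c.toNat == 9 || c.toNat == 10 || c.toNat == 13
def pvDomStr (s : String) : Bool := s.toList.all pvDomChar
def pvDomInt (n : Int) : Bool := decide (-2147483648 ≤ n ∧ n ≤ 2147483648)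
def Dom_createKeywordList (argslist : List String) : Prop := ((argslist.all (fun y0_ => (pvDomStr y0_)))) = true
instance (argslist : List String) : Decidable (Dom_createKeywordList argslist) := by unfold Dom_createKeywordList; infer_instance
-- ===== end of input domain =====

-- B replaces A's early-returning accumulator loop with a detect-then-slice decomposition (simpler).


-- ===== PORT A =====
-- the for-loop with accumulator keywordList; '[: -1]' via PySem slice
def createKeywordListLoop (acc : List String) : List String → List String
  | [] => PySem.List.slice acc none (some (-1))
  | i :: rest =>
      if i = "-f" then acc
      else if i ≠ "-o" ∧ i ≠ "-q" ∧ i ≠ "-r" then createKeywordListLoop (acc ++ [i]) rest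
      else createKeywordListLoop acc rest

def createKeywordList (argslist : List String) : List String :=
  createKeywordListLoop [] argslist

-- ===== PORT B =====
def pvFlags : List String := ["-o", "-q", "-r"]

def createKeywordList_alt (argslist : List String) : List String :=
  if argslist.contains "-f" then
    let pre := match PySem.List.index? argslist "-f" with
      | some k => PySem.List.slice argslist none (some (k : Int))
      | none => []  -- unreachable: guarded by the contains test
    pre.filter (fun i => !(pvFlags.contains i))
  else
    PySem.List.slice (argslist.filter (fun i => !(pvFlags.contains i))) none (some (-1))

-- ===== PRECONDITION & SPEC =====
def Spec_createKeywordList (argslist : List String) (out : List String) : Prop := out = createKeywordList_alt argslist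
instance (argslist : List String) (out : List String) : Decidable (Spec_createKeywordList argslist out) := by unfold Spec_createKeywordList; infer_instance

-- ===== CLAIM (what is proved, stated in full; the proofs are below) =====
def Claim_equal_createKeywordList : Prop := ∀ (argslist : List String), Dom_createKeywordList argslist → Spec_createKeywordList argslist (createKeywordList argslist)

-- ===== LEMMAS AND PROOFS =====

def pvPred (i : String) : Bool := !(pvFlags.contains i)

lemma pvPred_eq : pvPred = fun i : String => !decide (i ∈ pvFlags) := by
  funext i; simp [pvPred]

lemma pvPred_iff (i : String) : pvPred i = true ↔ (i ≠ "-o" ∧ i ≠ "-q" ∧ i ≠ "-r") := by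
  simp [pvPred, pvFlags]

-- loop characterization
lemma loop_char (xs : List String) : ∀ acc : List String,
    createKeywordListLoop acc xs =
      if xs.contains "-f" then acc ++ (xs.takeWhile (· ≠ "-f")).filter pvPred
      else (acc ++ xs.filter pvPred).dropLast := by
  induction xs with
  | nil => intro acc; simp [createKeywordListLoop, PySem.List.slice_to_neg_one]
  | cons i rest ih =>
    intro acc
    by_cases hf : i = "-f"
    · subst hf; simp [createKeywordListLoop]
    · by_cases hp : i ≠ "-o" ∧ i ≠ "-q" ∧ i ≠ "-r"
      · have hpb : pvPred i = true := (pvPred_iff i).mpr hp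
        simp only [createKeywordListLoop, if_neg hf, if_pos hp, ih]
        have hfi : ¬ ("-f" = i) := fun h => hf h.symm
        by_cases hc : rest.contains "-f" <;>
          simp_all
      · have hpb : pvPred i = false := by
          cases h : pvPred i
          · rfl
          · exact absurd ((pvPred_iff i).mp h) hp
        simp only [createKeywordListLoop, if_neg hf, if_neg hp, ih]
        have hfi : ¬ ("-f" = i) := fun h => hf h.symm
        by_cases hc : rest.contains "-f" <;>
          simp_all

lemma takeWhile_append_not_mem (v : String) (pre suf : List String) (h : v ∉ pre) :
    (pre ++ v :: suf).takeWhile (· ≠ v) = pre := by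
  induction pre with
  | nil => simp
  | cons x rest ih =>
    have hx : x ≠ v := fun hxv => h (by simp [hxv])
    have hr : v ∉ rest := fun hv => h (List.mem_cons_of_mem _ hv)
    simp [hx]
    simpa using ih hr

-- ===== VERDICT (by name: the statement is the Claim_ definition above) =====
theorem createKeywordList_spec : Claim_equal_createKeywordList := by
  intro argslist _
  unfold Spec_createKeywordList createKeywordList createKeywordList_alt
  rw [loop_char]
  by_cases hc : argslist.contains "-f"
  · have hm : "-f" ∈ argslist := by simpa using hc
    obtain ⟨k, hk⟩ := Option.isSome_iff_exists.mp
      ((PySem.List.index?_isSome_iff argslist "-f").mpr hm)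
    obtain ⟨pre, suf, hxs, hlen, hnp⟩ := (PySem.List.index?_eq_some_iff argslist "-f" k).mp hk
    subst hlen; subst hxs
    simp only [hc, if_pos, hk, List.nil_append, PySem.List.slice_to_natCast,
      takeWhile_append_not_mem _ _ _ hnp]
    simp
    rw [pvPred_eq]
  · have hm : ¬ ("-f" ∈ argslist) := by simpa using hc
    simp [hm, PySem.List.slice_to_neg_one]
    rw [pvPred_eq]
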